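-- pv_equiv track=rewrite | github.com/KlausZ2/AI_Final_Contest | agent_logic.py | mark_zombie_danger
-- ===== SOURCE A (Python) =====
-- ACTIONS = {
--     'W': (0, -1),
--     'A': (-1, 0),
--     'S': (0, 1),
--     'D': (1, 0)
-- }
--
-- def mark_zombie_danger(game_map):
--     width, height = len(game_map), len(game_map[0])
--     danger = [[False]*height for _ in range(width)]
--     for x in range(width):
--         for y in range(height):
--             if game_map[x][y] == "zombie":
--                 danger[x][y] = True
--                 for dx, dy in ACTIONS.values():
--                     nx, ny = x+dx, y+dy
--                     if 0 <= nx < width and 0 <= ny < height: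
--                         danger[nx][ny] = True
--     return danger
-- ===== SOURCE B (Python) =====
-- def mark_zombie_danger(game_map):
--     width, height = len(game_map), len(game_map[0])
--     offsets = ((0, -1), (-1, 0), (0, 1), (1, 0))
--
--     def dangerous(x, y):
--         if game_map[x][y] == "zombie":
--             return True
--         return any(
--             0 <= x + dx < width and 0 <= y + dy < height
--             and game_map[x + dx][y + dy] == "zombie"
--             for dx, dy in offsets
--         )
--
--     return [[dangerous(x, y) for y in range(height)] for x in range(width)]
-- ===== Notes on version B (the rewrite author's own statement) =====
-- stated objective: simpler
-- what changed: Replaces A's scatter (mutating a danger grid outward from each zombie) with a pure gather/stencil: each output cell is computed directly as 'this cell or an in-bounds neighbor is a zombie', built by nested comprehensions with no mutation.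
import Mathlib
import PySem

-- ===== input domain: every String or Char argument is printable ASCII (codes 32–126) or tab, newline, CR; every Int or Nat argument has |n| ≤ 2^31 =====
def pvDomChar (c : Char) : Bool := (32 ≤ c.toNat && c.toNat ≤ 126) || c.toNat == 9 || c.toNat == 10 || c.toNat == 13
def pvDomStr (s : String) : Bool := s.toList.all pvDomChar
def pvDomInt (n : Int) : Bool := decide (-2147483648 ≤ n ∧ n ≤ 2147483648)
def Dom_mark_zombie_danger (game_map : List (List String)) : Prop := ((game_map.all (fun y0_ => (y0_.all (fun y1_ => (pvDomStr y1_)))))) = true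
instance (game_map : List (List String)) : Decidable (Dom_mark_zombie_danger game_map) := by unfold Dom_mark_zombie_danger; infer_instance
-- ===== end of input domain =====

-- B rebuilds the danger grid as a pure gather/stencil (cell-by-cell 'self or in-bounds
-- neighbor is a zombie') instead of A's scatter which mutates a grid outward from each
-- zombie; objective: simpler (no mutation), same asymptotic cost.

-- ACTIONS.values() in source order W, A, S, D (shared constant of the module)
def pvActions : List (Int × Int) := [(0, -1), (-1, 0), (0, 1), (1, 0)]

-- the cell test game_map[x][y] == "zombie", shared verbatim by both Pythons
def pvZom (gm : List (List String)) (x y : Int) : Bool :=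
  PySem.List.pyGetD (PySem.List.pyGetD gm x []) y "" == "zombie"

-- ===== PORT A =====
-- danger[x][y] = True, via the total set/get primitives (indices are in range inside Pre_)
def pvSetCell (d : List (List Bool)) (x y : Int) : List (List Bool) :=
  PySem.List.pySetD d x (PySem.List.pySetD (PySem.List.pyGetD d x []) y true)

def mark_zombie_danger (game_map : List (List String)) : List (List Bool) :=
  let width := game_map.length
  let height := (PySem.List.pyGetD game_map 0 []).length
  let danger0 := List.replicate width (List.replicate height false)
  (PySem.List.pyRange 0 (width : Int) 1).foldl (fun d x =>
    (PySem.List.pyRange 0 (height : Int) 1).foldl (fun d y =>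
      if pvZom game_map x y then
        pvActions.foldl (fun d2 p =>
          let nx := x + p.1
          let ny := y + p.2
          if 0 ≤ nx ∧ nx < (width : Int) ∧ 0 ≤ ny ∧ ny < (height : Int) then
            pvSetCell d2 nx ny
          else d2) (pvSetCell d x y)
      else d) d) danger0

-- ===== PORT B =====
-- dangerous(x, y) from Source B: this cell, or any in-bounds ACTIONS-neighbor, is a zombie
def pvDangerous (game_map : List (List String)) (width height : Nat) (x y : Int) : Bool :=
  if pvZom game_map x y then true
  else pvActions.any (fun p =>
    decide (0 ≤ x + p.1) && decide (x + p.1 < (width : Int)) &&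
    decide (0 ≤ y + p.2) && decide (y + p.2 < (height : Int)) &&
    pvZom game_map (x + p.1) (y + p.2))

def mark_zombie_danger_alt (game_map : List (List String)) : List (List Bool) :=
  let width := game_map.length
  let height := (PySem.List.pyGetD game_map 0 []).length
  (List.range width).map (fun (x : Nat) =>
    (List.range height).map (fun (y : Nat) =>
      pvDangerous game_map width height (x : Int) (y : Int)))

-- ===== PRECONDITION & SPEC =====
-- Pre_ excludes exactly the inputs on which the Python A raises IndexError: the empty map
-- (game_map[0]) and ragged maps with a row shorter than the first row (game_map[x][y]).
def Pre_mark_zombie_danger (game_map : List (List String)) : Prop :=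
  game_map ≠ [] ∧ ∀ r ∈ game_map, (game_map.getD 0 []).length ≤ r.length
instance (game_map : List (List String)) : Decidable (Pre_mark_zombie_danger game_map) := by
  unfold Pre_mark_zombie_danger; infer_instance
def pvWitness_mark_zombie_danger : List (List String) :=
  [["zombie", "wall"], ["wall", "wall"]]

def Spec_mark_zombie_danger (game_map : List (List String)) (out : List (List Bool)) : Prop := out = mark_zombie_danger_alt game_map
instance (game_map : List (List String)) (out : List (List Bool)) : Decidable (Spec_mark_zombie_danger game_map out) := by unfold Spec_mark_zombie_danger; infer_instance

-- ===== CLAIM (what is proved, stated in full; the proofs are below) =====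
def Claim_equal_mark_zombie_danger : Prop := ∀ (game_map : List (List String)), Dom_mark_zombie_danger game_map → Pre_mark_zombie_danger game_map → Spec_mark_zombie_danger game_map (mark_zombie_danger game_map)

-- ===== LEMMAS AND PROOFS =====

-- reading at a nonnegative Int index is List.getD at its toNat
theorem pv_pyGetD_of_nonneg {α : Type} (xs : List α) {i : Int} (d : α) (h : 0 ≤ i) :
    PySem.List.pyGetD xs i d = xs.getD i.toNat d := by
  simp only [PySem.List.pyGetD, PySem.List.pyGet?, PySem.List.pyIdx?, if_pos h]
  split_ifs with h2
  · have hlt : i.toNat < xs.length := by omega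
    simp [List.getElem?_eq_getElem hlt]
  · have hge : xs.length ≤ i.toNat := by omega
    simp [List.getD_eq_getElem?_getD, List.getElem?_eq_none hge]

-- List.getD after List.set at an in-range index
theorem pv_getD_set_get {α : Type} (l : List α) (n m : Nat) (v dflt : α)
    (hn : n < l.length) :
    (l.set n v).getD m dflt = if m = n then v else l.getD m dflt := by
  by_cases h : m = n
  · subst h
    rw [List.getD_eq_getElem?_getD, List.getElem?_set_self hn, Option.getD_some, if_pos rfl]
  · rw [List.getD_eq_getElem?_getD, List.getElem?_set_ne (fun hh => h hh.symm),
      ← List.getD_eq_getElem?_getD, if_neg h]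

-- read a cell of the danger grid (Nat indices, default false)
def pvGet (d : List (List Bool)) (i j : Nat) : Bool := (d.getD i []).getD j false

-- rectangular-shape invariant of the danger grid
def pvShape (W H : Nat) (d : List (List Bool)) : Prop :=
  d.length = W ∧ ∀ r ∈ d, r.length = H

-- (x,y) marks (i,j): (i,j) is (x,y) itself or one of its four neighbors
def pvAdj (x y : Int) (i j : Nat) : Bool :=
  decide ((x = i ∧ y = j) ∨ (x = i ∧ y = (j : Int) + 1) ∨ (x = (i : Int) + 1 ∧ y = j) ∨
          (x = i ∧ (j : Int) = y + 1) ∨ ((i : Int) = x + 1 ∧ y = j))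

theorem pvShape_setCell {W H : Nat} {d : List (List Bool)} (hs : pvShape W H d)
    {x y : Int} (hx0 : 0 ≤ x) (hxW : x < (W : Int)) (hy0 : 0 ≤ y) (hyH : y < (H : Int)) :
    pvShape W H (pvSetCell d x y) := by
  obtain ⟨hl, hr⟩ := hs
  unfold pvSetCell
  rw [PySem.List.pySetD_of_nonneg _ _ hx0, PySem.List.pySetD_of_nonneg _ _ hy0,
    pv_pyGetD_of_nonneg _ _ hx0]
  refine ⟨by simp [hl], ?_⟩
  intro r hrmem
  rcases List.mem_or_eq_of_mem_set hrmem with h | h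
  · exact hr r h
  · subst h
    have hx : x.toNat < d.length := by omega
    rw [List.length_set, List.getD_eq_getElem _ _ hx]
    exact hr _ (List.getElem_mem hx)

theorem pvGet_setCell {W H : Nat} {d : List (List Bool)} (hs : pvShape W H d)
    {x y : Int} (hx0 : 0 ≤ x) (hxW : x < (W : Int)) (hy0 : 0 ≤ y) (hyH : y < (H : Int))
    (i j : Nat) :
    pvGet (pvSetCell d x y) i j =
      if i = x.toNat ∧ j = y.toNat then true else pvGet d i j := by
  obtain ⟨hl, hr⟩ := hs
  have hxl : x.toNat < d.length := by omega
  have hyl : y.toNat < (d.getD x.toNat []).length := by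
    rw [List.getD_eq_getElem _ _ hxl, hr _ (List.getElem_mem hxl)]; omega
  unfold pvSetCell pvGet
  rw [PySem.List.pySetD_of_nonneg _ _ hx0, PySem.List.pySetD_of_nonneg _ _ hy0,
    pv_pyGetD_of_nonneg _ _ hx0, pv_getD_set_get _ _ _ _ _ hxl]
  by_cases hix : i = x.toNat
  · rw [if_pos hix, pv_getD_set_get _ _ _ _ _ hyl]
    by_cases hjy : j = y.toNat
    · rw [if_pos hjy, if_pos ⟨hix, hjy⟩]
    · rw [if_neg hjy, if_neg (by tauto), hix]
  · rw [if_neg hix, if_neg (by tauto)]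

-- one iteration of A's inner body: conditional scatter from (x,y)
def pvStep (gm : List (List String)) (W H : Nat) (d : List (List Bool)) (x y : Int) :
    List (List Bool) :=
  if pvZom gm x y then
    pvActions.foldl (fun d2 p =>
      if 0 ≤ x + p.1 ∧ x + p.1 < (W : Int) ∧ 0 ≤ y + p.2 ∧ y + p.2 < (H : Int) then
        pvSetCell d2 (x + p.1) (y + p.2)
      else d2) (pvSetCell d x y)
  else d

theorem pvShape_if {W H : Nat} (a b : Int) (d : List (List Bool)) (h : pvShape W H d) :
    pvShape W H (if 0 ≤ a ∧ a < (W : Int) ∧ 0 ≤ b ∧ b < (H : Int) then pvSetCell d a b else d) := by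
  split
  · rename_i hc
    exact pvShape_setCell h hc.1 hc.2.1 hc.2.2.1 hc.2.2.2
  · exact h

theorem pvShape_step {W H : Nat} {gm : List (List String)} {d : List (List Bool)}
    (hs : pvShape W H d) {x y : Int}
    (hx0 : 0 ≤ x) (hxW : x < (W : Int)) (hy0 : 0 ≤ y) (hyH : y < (H : Int)) :
    pvShape W H (pvStep gm W H d x y) := by
  unfold pvStep
  split
  · simp only [pvActions, List.foldl]
    exact pvShape_if _ _ _ (pvShape_if _ _ _ (pvShape_if _ _ _ (pvShape_if _ _ _
      (pvShape_setCell hs hx0 hxW hy0 hyH))))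
  · exact hs

theorem pvGet_if {W H : Nat} {d : List (List Bool)} (hs : pvShape W H d)
    (a b : Int) (i j : Nat) (hi : i < W) (hj : j < H) :
    pvGet (if 0 ≤ a ∧ a < (W : Int) ∧ 0 ≤ b ∧ b < (H : Int) then pvSetCell d a b else d) i j =
      (pvGet d i j || decide (a = (i : Int) ∧ b = (j : Int))) := by
  split
  · rename_i hc
    rw [pvGet_setCell hs hc.1 hc.2.1 hc.2.2.1 hc.2.2.2]
    by_cases hij : i = a.toNat ∧ j = b.toNat
    · rw [if_pos hij]
      have : (a = (i : Int) ∧ b = (j : Int)) := by omega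
      simp [this]
    · rw [if_neg hij]
      have : ¬ (a = (i : Int) ∧ b = (j : Int)) := by omega
      simp [this]
  · rename_i hc
    have : ¬ (a = (i : Int) ∧ b = (j : Int)) := by omega
    simp [this]

theorem pvGet_step {W H : Nat} {gm : List (List String)} {d : List (List Bool)}
    (hs : pvShape W H d) {x y : Int}
    (hx0 : 0 ≤ x) (hxW : x < (W : Int)) (hy0 : 0 ≤ y) (hyH : y < (H : Int))
    (i j : Nat) (hi : i < W) (hj : j < H) :
    pvGet (pvStep gm W H d x y) i j =
      (pvGet d i j || (pvZom gm x y && pvAdj x y i j)) := by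
  unfold pvStep
  by_cases hz : pvZom gm x y
  · rw [if_pos hz, hz, Bool.true_and]
    simp only [pvActions, List.foldl]
    have s0 := pvShape_setCell hs hx0 hxW hy0 hyH
    have s1 := pvShape_if (W := W) (H := H) (x + 0) (y + -1) _ s0
    have s2 := pvShape_if (W := W) (H := H) (x + -1) (y + 0) _ s1
    have s3 := pvShape_if (W := W) (H := H) (x + 0) (y + 1) _ s2
    rw [pvGet_if s3 _ _ _ _ hi hj, pvGet_if s2 _ _ _ _ hi hj, pvGet_if s1 _ _ _ _ hi hj,
      pvGet_if s0 _ _ _ _ hi hj, pvGet_setCell hs hx0 hxW hy0 hyH]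
    have h0 : (if i = x.toNat ∧ j = y.toNat then true else pvGet d i j) =
        (pvGet d i j || decide (x = (i : Int) ∧ y = (j : Int))) := by
      by_cases h : i = x.toNat ∧ j = y.toNat
      · rw [if_pos h]
        have : x = (i : Int) ∧ y = (j : Int) := by omega
        simp [this]
      · rw [if_neg h]
        have : ¬ (x = (i : Int) ∧ y = (j : Int)) := by omega
        simp [this]
    rw [h0]
    rw [Bool.eq_iff_iff]
    simp only [Bool.or_eq_true, decide_eq_true_eq, pvAdj]
    rcases hg : pvGet d i j
    · simp only [Bool.false_eq_true, false_or]
      omega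
    · simp
  · rw [if_neg hz]
    rw [Bool.eq_false_iff.mpr hz]
    simp

-- characterization of a foldl over range(c, B) whose body preserves the shape and
-- sets exactly the cells described by q
theorem pvFold_char {W H : Nat} (B : Int)
    (f : List (List Bool) → Int → List (List Bool)) (q : Int → Nat → Nat → Bool)
    (hstep : ∀ (d : List (List Bool)) (c : Int), pvShape W H d → 0 ≤ c → c < B →
      pvShape W H (f d c) ∧
      ∀ (i j : Nat), i < W → j < H → pvGet (f d c) i j = (pvGet d i j || q c i j)) :
    ∀ (n : Nat) (c : Int), 0 ≤ c → c + n = B →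
      ∀ (d : List (List Bool)), pvShape W H d →
      pvShape W H ((PySem.List.pyRange c B 1).foldl f d) ∧
      ∀ (i j : Nat), i < W → j < H →
        pvGet ((PySem.List.pyRange c B 1).foldl f d) i j =
          (pvGet d i j || (PySem.List.pyRange c B 1).any (fun z => q z i j)) := by
  intro n
  induction n with
  | zero =>
    intro c hc he d hd
    rw [PySem.List.pyRange_one_eq_nil (by omega)]
    simp [hd]
  | succ m ih =>
    intro c hc he d hd
    rw [PySem.List.pyRange_one_cons (by omega)]
    simp only [List.foldl_cons, List.any_cons]
    obtain ⟨hsf, hgf⟩ := hstep d c hd hc (by omega)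
    obtain ⟨ihs, ihg⟩ := ih (c + 1) (by omega) (by omega) _ hsf
    refine ⟨ihs, ?_⟩
    intro i j hi hj
    rw [ihg i j hi hj, hgf i j hi hj, Bool.or_assoc]

-- A's body, with the lets resolved and the loop body named pvStep (definitionally equal)
theorem pvA_def (gm : List (List String)) :
    mark_zombie_danger gm =
      (PySem.List.pyRange 0 (gm.length : Int) 1).foldl
        (fun d x => (PySem.List.pyRange 0 (((PySem.List.pyGetD gm 0 []).length : Nat) : Int) 1).foldl
          (fun d y => pvStep gm gm.length (PySem.List.pyGetD gm 0 []).length d x y) d)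
        (List.replicate gm.length (List.replicate (PySem.List.pyGetD gm 0 []).length false)) := by
  rfl

theorem pvShape_danger0 (gm : List (List String)) :
    pvShape gm.length (PySem.List.pyGetD gm 0 []).length
      (List.replicate gm.length (List.replicate (PySem.List.pyGetD gm 0 []).length false)) := by
  constructor
  · simp
  · intro r hr
    rw [List.eq_of_mem_replicate hr]
    simp

-- the outer loop of A, characterized via pvFold_char applied twice
theorem pvOuter_char (gm : List (List String)) :
    ∀ (d : List (List Bool)),
      pvShape gm.length (PySem.List.pyGetD gm 0 []).length d →
      pvShape gm.length (PySem.List.pyGetD gm 0 []).length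
        ((PySem.List.pyRange 0 (gm.length : Int) 1).foldl
          (fun d x => (PySem.List.pyRange 0 (((PySem.List.pyGetD gm 0 []).length : Nat) : Int) 1).foldl
            (fun d y => pvStep gm gm.length (PySem.List.pyGetD gm 0 []).length d x y) d) d) ∧
      ∀ (i j : Nat), i < gm.length → j < (PySem.List.pyGetD gm 0 []).length →
        pvGet ((PySem.List.pyRange 0 (gm.length : Int) 1).foldl
          (fun d x => (PySem.List.pyRange 0 (((PySem.List.pyGetD gm 0 []).length : Nat) : Int) 1).foldl
            (fun d y => pvStep gm gm.length (PySem.List.pyGetD gm 0 []).length d x y) d) d) i j =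
          (pvGet d i j ||
            (PySem.List.pyRange 0 (gm.length : Int) 1).any (fun x =>
              (PySem.List.pyRange 0 (((PySem.List.pyGetD gm 0 []).length : Nat) : Int) 1).any (fun y =>
                pvZom gm x y && pvAdj x y i j))) := by
  intro d hd
  have hinner : ∀ (d' : List (List Bool)) (x : Int),
      pvShape gm.length (PySem.List.pyGetD gm 0 []).length d' →
      0 ≤ x → x < (gm.length : Int) →
      pvShape gm.length (PySem.List.pyGetD gm 0 []).length
        ((PySem.List.pyRange 0 (((PySem.List.pyGetD gm 0 []).length : Nat) : Int) 1).foldl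
          (fun d y => pvStep gm gm.length (PySem.List.pyGetD gm 0 []).length d x y) d') ∧
      ∀ (i j : Nat), i < gm.length → j < (PySem.List.pyGetD gm 0 []).length →
        pvGet ((PySem.List.pyRange 0 (((PySem.List.pyGetD gm 0 []).length : Nat) : Int) 1).foldl
          (fun d y => pvStep gm gm.length (PySem.List.pyGetD gm 0 []).length d x y) d') i j =
          (pvGet d' i j ||
            (PySem.List.pyRange 0 (((PySem.List.pyGetD gm 0 []).length : Nat) : Int) 1).any (fun y =>
              pvZom gm x y && pvAdj x y i j)) := by
    intro d' x hd' hx0 hxW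
    exact pvFold_char ((PySem.List.pyGetD gm 0 []).length : Int)
      (fun d y => pvStep gm gm.length (PySem.List.pyGetD gm 0 []).length d x y)
      (fun y i j => pvZom gm x y && pvAdj x y i j)
      (fun d'' y hd'' hy0 hyH => ⟨pvShape_step hd'' hx0 hxW hy0 hyH,
        fun i j hi hj => pvGet_step hd'' hx0 hxW hy0 hyH i j hi hj⟩)
      (PySem.List.pyGetD gm 0 []).length 0 (by omega) (by omega) d' hd'
  exact pvFold_char (gm.length : Int)
    (fun d x => (PySem.List.pyRange 0 (((PySem.List.pyGetD gm 0 []).length : Nat) : Int) 1).foldl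
      (fun d y => pvStep gm gm.length (PySem.List.pyGetD gm 0 []).length d x y) d)
    (fun x i j => (PySem.List.pyRange 0 (((PySem.List.pyGetD gm 0 []).length : Nat) : Int) 1).any
      (fun y => pvZom gm x y && pvAdj x y i j))
    (fun d' c hd' hc0 hcW => hinner d' c hd' hc0 hcW)
    gm.length 0 (by omega) (by omega) d hd

theorem pvShape_A (gm : List (List String)) :
    pvShape gm.length (PySem.List.pyGetD gm 0 []).length (mark_zombie_danger gm) := by
  rw [pvA_def]
  exact (pvOuter_char gm _ (pvShape_danger0 gm)).1

-- pointwise value of A: the double-any scatter condition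
theorem pvA_get (gm : List (List String)) (i j : Nat)
    (hi : i < gm.length) (hj : j < (PySem.List.pyGetD gm 0 []).length) :
    pvGet (mark_zombie_danger gm) i j =
      (PySem.List.pyRange 0 (gm.length : Int) 1).any (fun x =>
        (PySem.List.pyRange 0 (((PySem.List.pyGetD gm 0 []).length : Nat) : Int) 1).any (fun y =>
          pvZom gm x y && pvAdj x y i j)) := by
  rw [pvA_def]
  rw [(pvOuter_char gm _ (pvShape_danger0 gm)).2 i j hi hj]
  have h0 : pvGet (List.replicate gm.length
      (List.replicate (PySem.List.pyGetD gm 0 []).length false)) i j = false := by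
    unfold pvGet
    simp [List.getD_eq_getElem?_getD, hi, hj]
  rw [h0, Bool.false_or]

-- the scatter condition equals B's gather condition
theorem pv_gather_eq_scatter (gm : List (List String)) (W H i j : Nat)
    (hi : i < W) (hj : j < H) :
    (PySem.List.pyRange 0 (W : Int) 1).any (fun x =>
      (PySem.List.pyRange 0 (H : Int) 1).any (fun y => pvZom gm x y && pvAdj x y i j)) =
    pvDangerous gm W H (i : Int) (j : Int) := by
  rw [Bool.eq_iff_iff]
  constructor
  · intro h
    simp only [List.any_eq_true, PySem.List.mem_pyRange_one, Bool.and_eq_true] at h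
    obtain ⟨x, ⟨hx0, hxW⟩, y, ⟨hy0, hyH⟩, hz, hadj⟩ := h
    simp only [pvAdj, decide_eq_true_eq] at hadj
    unfold pvDangerous
    simp only [pvActions, List.any_cons, List.any_nil, Bool.or_false]
    rcases hadj with ⟨h1, h2⟩ | ⟨h1, h2⟩ | ⟨h1, h2⟩ | ⟨h1, h2⟩ | ⟨h1, h2⟩
    · -- (x, y) = (i, j) itself
      rw [h1, h2] at hz
      rw [if_pos hz]
    · -- zombie below: offset (0, 1)
      split
      · rfl
      · simp only [Bool.or_eq_true, Bool.and_eq_true, decide_eq_true_eq]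
        refine Or.inr (Or.inr (Or.inl ⟨⟨⟨⟨by omega, by omega⟩, by omega⟩, by omega⟩, ?_⟩))
        rw [show (i : Int) + 0 = x by omega, show (j : Int) + 1 = y by omega]
        exact hz
    · -- zombie to the right: offset (1, 0)
      split
      · rfl
      · simp only [Bool.or_eq_true, Bool.and_eq_true, decide_eq_true_eq]
        refine Or.inr (Or.inr (Or.inr ⟨⟨⟨⟨by omega, by omega⟩, by omega⟩, by omega⟩, ?_⟩))
        rw [show (i : Int) + 1 = x by omega, show (j : Int) + 0 = y by omega]
        exact hz
    · -- zombie above: offset (0, -1)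
      split
      · rfl
      · simp only [Bool.or_eq_true, Bool.and_eq_true, decide_eq_true_eq]
        refine Or.inl ⟨⟨⟨⟨by omega, by omega⟩, by omega⟩, by omega⟩, ?_⟩
        rw [show (i : Int) + 0 = x by omega, show (j : Int) + -1 = y by omega]
        exact hz
    · -- zombie to the left: offset (-1, 0)
      split
      · rfl
      · simp only [Bool.or_eq_true, Bool.and_eq_true, decide_eq_true_eq]
        refine Or.inr (Or.inl ⟨⟨⟨⟨by omega, by omega⟩, by omega⟩, by omega⟩, ?_⟩)
        rw [show (i : Int) + -1 = x by omega, show (j : Int) + 0 = y by omega]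
        exact hz
  · intro h
    simp only [List.any_eq_true, PySem.List.mem_pyRange_one, Bool.and_eq_true]
    unfold pvDangerous at h
    split at h
    · rename_i hz
      refine ⟨i, ⟨by omega, by omega⟩, j, ⟨by omega, by omega⟩, hz, ?_⟩
      unfold pvAdj
      exact decide_eq_true (Or.inl ⟨by omega, by omega⟩)
    · simp only [pvActions, List.any_cons, List.any_nil, Bool.or_false, Bool.or_eq_true,
        Bool.and_eq_true, decide_eq_true_eq] at h
      rcases h with ⟨⟨⟨⟨ha, hb⟩, hc⟩, hd⟩, hz⟩ | ⟨⟨⟨⟨ha, hb⟩, hc⟩, hd⟩, hz⟩ |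
        ⟨⟨⟨⟨ha, hb⟩, hc⟩, hd⟩, hz⟩ | ⟨⟨⟨⟨ha, hb⟩, hc⟩, hd⟩, hz⟩
      · refine ⟨(i : Int) + 0, ⟨by omega, by omega⟩, (j : Int) + -1, ⟨by omega, by omega⟩,
          hz, ?_⟩
        unfold pvAdj
        exact decide_eq_true (Or.inr (Or.inr (Or.inr (Or.inl ⟨by omega, by omega⟩))))
      · refine ⟨(i : Int) + -1, ⟨by omega, by omega⟩, (j : Int) + 0, ⟨by omega, by omega⟩,
          hz, ?_⟩
        unfold pvAdj
        exact decide_eq_true (Or.inr (Or.inr (Or.inr (Or.inr ⟨by omega, by omega⟩))))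
      · refine ⟨(i : Int) + 0, ⟨by omega, by omega⟩, (j : Int) + 1, ⟨by omega, by omega⟩,
          hz, ?_⟩
        unfold pvAdj
        exact decide_eq_true (Or.inr (Or.inl ⟨by omega, by omega⟩))
      · refine ⟨(i : Int) + 1, ⟨by omega, by omega⟩, (j : Int) + 0, ⟨by omega, by omega⟩,
          hz, ?_⟩
        unfold pvAdj
        exact decide_eq_true (Or.inr (Or.inr (Or.inl ⟨by omega, by omega⟩)))

-- the two ports agree on every input (Pre_ only marks where the Python A raises)
theorem pv_equal_all (gm : List (List String)) :
    mark_zombie_danger gm = mark_zombie_danger_alt gm := by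
  have hsA := pvShape_A gm
  apply List.ext_getElem
  · rw [hsA.1]
    simp [mark_zombie_danger_alt]
  · intro i h1 h2
    have hiW : i < gm.length := by rw [← hsA.1]; exact h1
    apply List.ext_getElem
    · rw [hsA.2 _ (List.getElem_mem h1)]
      simp [mark_zombie_danger_alt]
    · intro j hj1 hj2
      have hjH : j < (PySem.List.pyGetD gm 0 []).length := by
        rw [hsA.2 _ (List.getElem_mem h1)] at hj1
        exact hj1
      have hrow : (mark_zombie_danger gm).getD i [] = (mark_zombie_danger gm)[i] :=
        List.getD_eq_getElem _ _ h1
      have hA : (mark_zombie_danger gm)[i][j] = pvGet (mark_zombie_danger gm) i j := by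
        unfold pvGet
        rw [hrow, List.getD_eq_getElem _ _ hj1]
      rw [hA, pvA_get gm i j hiW hjH,
        pv_gather_eq_scatter gm gm.length (PySem.List.pyGetD gm 0 []).length i j hiW hjH]
      simp only [mark_zombie_danger_alt, List.getElem_map, List.getElem_range]

-- ===== VERDICT (by name: the statement is the Claim_ definition above) =====
theorem mark_zombie_danger_spec : Claim_equal_mark_zombie_danger := by
  intro gm _ _
  unfold Spec_mark_zombie_danger
  exact pv_equal_all gm
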